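-- pv_equiv track=rewrite | github.com/MixologyXBot/Telegram-Stremio | Backend/fastapi/routes/stremio_routes.py | get_resolution_priority
-- ===== SOURCE A (Python) =====
-- def get_resolution_priority(stream_name: str) -> int:
--     resolution_map = {
--         "2160p": 2160, "4k": 2160, "uhd": 2160,
--         "1080p": 1080, "fhd": 1080,
--         "720p": 720, "hd": 720,
--         "480p": 480, "sd": 480,
--         "360p": 360,
--     }
--     for res_key, res_value in resolution_map.items():
--         if res_key in stream_name.lower():
--             return res_value
--     return 1
-- ===== SOURCE B (Python) =====
-- def get_resolution_priority(stream_name: str) -> int: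
--     resolution_map = {
--         "2160p": 2160, "4k": 2160, "uhd": 2160,
--         "1080p": 1080, "fhd": 1080,
--         "720p": 720, "hd": 720,
--         "480p": 480, "sd": 480,
--         "360p": 360,
--     }
--     name = stream_name.lower()
--     return max((v for k, v in resolution_map.items() if k in name), default=1)
-- ===== Notes on version B (the rewrite author's own statement) =====
-- stated objective: idiomatic
-- what changed: Replaces the early-return scan with a single reduce: max over all matching values (default 1), correct because the map is listed in non-increasing value order.
import Mathlib
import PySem

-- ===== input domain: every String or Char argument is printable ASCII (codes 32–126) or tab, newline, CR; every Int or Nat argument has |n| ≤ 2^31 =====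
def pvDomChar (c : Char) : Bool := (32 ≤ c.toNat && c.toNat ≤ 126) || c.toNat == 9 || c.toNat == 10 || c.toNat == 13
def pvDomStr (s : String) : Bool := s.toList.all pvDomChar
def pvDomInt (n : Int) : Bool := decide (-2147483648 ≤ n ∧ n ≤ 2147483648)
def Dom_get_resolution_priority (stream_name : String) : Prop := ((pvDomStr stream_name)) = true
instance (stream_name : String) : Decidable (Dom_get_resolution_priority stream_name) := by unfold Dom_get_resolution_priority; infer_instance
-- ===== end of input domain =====

-- ===== PORT A =====
-- B reduces with max over all matching values instead of A's first-match early return; objective: idiomatic.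
def resMap : List (String × Int) :=
  [("2160p", 2160), ("4k", 2160), ("uhd", 2160),
   ("1080p", 1080), ("fhd", 1080),
   ("720p", 720), ("hd", 720),
   ("480p", 480), ("sd", 480),
   ("360p", 360)]

-- A's for-loop with early return over the dict's items
def aLoop (name : String) : List (String × Int) → Int
  | [] => 1
  | (k, v) :: rest => if PySem.Str.isIn k name then v else aLoop name rest

def get_resolution_priority (stream_name : String) : Int :=
  aLoop (PySem.Str.lower stream_name) resMap

-- ===== PORT B =====
-- max(gen, default=1): max of the matching values, 1 if none match
def get_resolution_priority_alt (stream_name : String) : Int :=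
  let name := PySem.Str.lower stream_name
  match (resMap.filter (fun kv => PySem.Str.isIn kv.1 name)).map Prod.snd with
  | [] => 1
  | x :: xs => xs.foldl max x

-- ===== PRECONDITION & SPEC =====
def Spec_get_resolution_priority (stream_name : String) (out : Int) : Prop := out = get_resolution_priority_alt stream_name
instance (stream_name : String) (out : Int) : Decidable (Spec_get_resolution_priority stream_name out) := by unfold Spec_get_resolution_priority; infer_instance

-- ===== CLAIM (what is proved, stated in full; the proofs are below) =====
def Claim_equal_get_resolution_priority : Prop := ∀ (stream_name : String), Dom_get_resolution_priority stream_name → Spec_get_resolution_priority stream_name (get_resolution_priority stream_name)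

-- ===== LEMMAS AND PROOFS =====
theorem foldl_max_of_le (x : Int) (ys : List Int) (h : ∀ y ∈ ys, y ≤ x) :
    ys.foldl max x = x := by
  induction ys with
  | nil => rfl
  | cons y ys ih =>
    simp only [List.foldl_cons]
    have hy : y ≤ x := h y (by simp)
    rw [max_eq_left hy]
    exact ih (fun z hz => h z (by simp [hz]))

theorem aLoop_eq_maxMatch (name : String) (l : List (String × Int))
    (hp : List.Pairwise (fun a b : String × Int => b.2 ≤ a.2) l) :
    aLoop name l =
      (match (l.filter (fun kv => PySem.Str.isIn kv.1 name)).map Prod.snd with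
       | [] => (1 : Int)
       | x :: xs => xs.foldl max x) := by
  induction l with
  | nil => rfl
  | cons hd rest ih =>
    obtain ⟨k, v⟩ := hd
    rw [List.pairwise_cons] at hp
    by_cases hin : PySem.Str.isIn k name = true
    · simp only [aLoop, hin, if_true, List.filter_cons, List.map_cons]
      exact (foldl_max_of_le v _ (fun y hy => by
        obtain ⟨⟨k', v'⟩, hmem, rfl⟩ := List.mem_map.mp hy
        exact hp.1 _ (List.mem_of_mem_filter hmem))).symm
    · have hin' : PySem.Str.isIn k name = false := by simpa using hin
      simp only [aLoop, hin', Bool.false_eq_true, if_false, List.filter_cons]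
      exact ih hp.2

-- ===== VERDICT (by name: the statement is the Claim_ definition above) =====
theorem get_resolution_priority_spec : Claim_equal_get_resolution_priority := by
  intro s _
  unfold Spec_get_resolution_priority get_resolution_priority get_resolution_priority_alt
  exact aLoop_eq_maxMatch (PySem.Str.lower s) resMap (by decide)
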